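-- pv_equiv track=rewrite | github.com/Lukasge02/Streamworks-KI | backend/routers/wizard.py | _match_session_id
-- ===== SOURCE A (Python) =====
-- def _match_session_id(
--     target_name: str | None,
--     session_names: dict[str, str],
-- ) -> str | None:
--     """Match an AI-detected stream name to a session ID (case-insensitive, substring fallback)."""
--     if not target_name:
--         # Auto-select if only one session exists
--         if len(session_names) == 1:
--             return next(iter(session_names))
--         return None
--
--     target_lower = target_name.lower()
--
--     # Exact match (case-insensitive)
--     for sid, name in session_names.items():
--         if name.lower() == target_lower:
--             return sid
--
--     # Substring match
--     for sid, name in session_names.items():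
--         if target_lower in name.lower() or name.lower() in target_lower:
--             return sid
--
--     return None
-- ===== SOURCE B (Python) =====
-- def _match_session_id(
--     target_name: str | None,
--     session_names: dict[str, str],
-- ) -> str | None:
--     """Single pass: return on exact match; remember the first substring candidate."""
--     if not target_name:
--         if len(session_names) == 1:
--             return next(iter(session_names))
--         return None
--
--     target_lower = target_name.lower()
--     candidate = None
--     for sid, name in session_names.items():
--         name_lower = name.lower()
--         if name_lower == target_lower:
--             return sid
--         if candidate is None and (target_lower in name_lower or name_lower in target_lower):
--             candidate = sid
--     return candidate
-- ===== Notes on version B (the rewrite author's own statement) =====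
-- stated objective: alternative
-- what changed: Replaced A's two full passes (exact scan, then substring scan) by one single pass that returns immediately on an exact match and records the first substring candidate while scanning, computing each name.lower() once instead of up to three times.
import Mathlib
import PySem

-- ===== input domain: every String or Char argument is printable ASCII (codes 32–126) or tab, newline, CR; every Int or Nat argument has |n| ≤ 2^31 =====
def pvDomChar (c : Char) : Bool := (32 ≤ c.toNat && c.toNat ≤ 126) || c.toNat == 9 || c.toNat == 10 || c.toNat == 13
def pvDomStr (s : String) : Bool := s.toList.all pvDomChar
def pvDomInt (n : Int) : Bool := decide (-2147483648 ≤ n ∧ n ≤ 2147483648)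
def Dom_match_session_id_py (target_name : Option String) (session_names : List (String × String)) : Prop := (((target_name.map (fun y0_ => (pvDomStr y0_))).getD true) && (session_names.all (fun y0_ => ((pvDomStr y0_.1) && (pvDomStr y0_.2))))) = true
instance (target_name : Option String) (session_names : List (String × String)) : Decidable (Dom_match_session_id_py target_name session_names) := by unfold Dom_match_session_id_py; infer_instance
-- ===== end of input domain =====

-- B replaces A's two scans (exact, then substring) by one single pass that records the first substring candidate; alternative decomposition, same asymptotic cost.


-- ===== PORT A =====
-- first loop of A: exact case-insensitive match, returns the first sid whose name.lower() == target_lower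
def pvExactScan (target_lower : String) : List (String × String) → Option String
  | [] => none
  | (sid, name) :: rest =>
      if PySem.Str.lower name = target_lower then some sid
      else pvExactScan target_lower rest

-- second loop of A: substring fallback, first sid with target_lower in name.lower() or name.lower() in target_lower
def pvSubScan (target_lower : String) : List (String × String) → Option String
  | [] => none
  | (sid, name) :: rest =>
      if PySem.Str.isIn target_lower (PySem.Str.lower name) || PySem.Str.isIn (PySem.Str.lower name) target_lower
      then some sid
      else pvSubScan target_lower rest

def match_session_id_py (target_name : Option String) (session_names : List (String × String)) : Option String :=
  -- `if not target_name` is true for None and for ""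
  if target_name.getD "" = "" then
    if session_names.length = 1 then session_names.head?.map Prod.fst else none
  else
    let target_lower := PySem.Str.lower (target_name.getD "")
    match pvExactScan target_lower session_names with
    | some sid => some sid
    | none => pvSubScan target_lower session_names

-- ===== PORT B =====
-- B's single pass: return on exact match, remember the first substring candidate
def pvOnePass (target_lower : String) : List (String × String) → Option String → Option String
  | [], cand => cand
  | (sid, name) :: rest, cand =>
      let name_lower := PySem.Str.lower name
      if name_lower = target_lower then some sid
      else
        pvOnePass target_lower rest
          (if cand.isNone && (PySem.Str.isIn target_lower name_lower || PySem.Str.isIn name_lower target_lower)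
           then some sid else cand)

def match_session_id_py_alt (target_name : Option String) (session_names : List (String × String)) : Option String :=
  if target_name.getD "" = "" then
    if session_names.length = 1 then session_names.head?.map Prod.fst else none
  else
    pvOnePass (PySem.Str.lower (target_name.getD "")) session_names none

-- ===== PRECONDITION & SPEC =====
def Spec_match_session_id_py (target_name : Option String) (session_names : List (String × String)) (out : Option String) : Prop := out = match_session_id_py_alt target_name session_names
instance (target_name : Option String) (session_names : List (String × String)) (out : Option String) : Decidable (Spec_match_session_id_py target_name session_names out) := by unfold Spec_match_session_id_py; infer_instance

-- ===== CLAIM (what is proved, stated in full; the proofs are below) =====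
def Claim_equal_match_session_id_py : Prop := ∀ (target_name : Option String) (session_names : List (String × String)), Dom_match_session_id_py target_name session_names → Spec_match_session_id_py target_name session_names (match_session_id_py target_name session_names)

-- ===== LEMMAS AND PROOFS =====
-- the single pass with candidate `cand` equals: exact hit in l, else cand, else first substring hit in l
theorem pvOnePass_eq (tl : String) (l : List (String × String)) (cand : Option String) :
    pvOnePass tl l cand = ((pvExactScan tl l).or (cand.or (pvSubScan tl l))) := by
  induction l generalizing cand with
  | nil => cases cand <;> simp [pvOnePass, pvExactScan, pvSubScan]
  | cons p rest ih =>
    obtain ⟨sid, name⟩ := p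
    simp only [pvOnePass, pvExactScan, pvSubScan]
    by_cases hx : PySem.Str.lower name = tl
    · simp [hx]
    · simp only [hx, if_false]
      rw [ih]
      by_cases hs : (PySem.Str.isIn tl (PySem.Str.lower name) || PySem.Str.isIn (PySem.Str.lower name) tl) = true <;>
        cases cand <;>
          simp only [Option.isNone_none, Option.isNone_some, Bool.true_and, Bool.false_and, hs,
            if_true, if_false, Bool.false_eq_true] <;>
        simp

-- ===== VERDICT (by name: the statement is the Claim_ definition above) =====
theorem match_session_id_py_spec : Claim_equal_match_session_id_py := by
  intro target_name session_names _
  unfold Spec_match_session_id_py match_session_id_py match_session_id_py_alt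
  by_cases h : target_name.getD "" = ""
  · simp [h]
  · simp only [h, if_false]
    rw [pvOnePass_eq]
    cases pvExactScan (PySem.Str.lower (target_name.getD "")) session_names <;> simp
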